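-- pv_equiv track=rewrite | github.com/JunguLiu/Miniproject | Final.py | delet_space
-- ===== SOURCE A (Python) =====
-- def delet_space(string):
--     str_lis = []
--     string1=""
--     for i in string:
--         str_lis.append(i)
--     for i in range(len(str_lis)):
--         if str_lis[i] == '>'or  str_lis[i] =='=' or  str_lis[i] =='<':
--             for j in range(i+1,len(str_lis)):
--                 if str_lis[j] !=" ":
--                     break
--                 if str_lis[j] == " ":
--                     str_lis[j] = ""
--
--             for k in reversed(range(0,i)):
--                 if str_lis[k] !=" ":
--                     break
--                 if str_lis[k] == " ":
--                     str_lis[k] = ""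
--
--     for i in str_lis:
--         string1 += i
--
--
--     return string1
-- ===== SOURCE B (Python) =====
-- def delet_space(string):
--     # Single left-to-right pass: buffer each run of spaces; a run is dropped
--     # when it immediately follows or precedes a comparison operator.
--     OPS = '<>='
--     out = []
--     run = 0
--     prev_op = False
--     for c in string:
--         if c == ' ':
--             run += 1
--         elif c in OPS:
--             run = 0
--             prev_op = True
--             out.append(c)
--         else:
--             if not prev_op:
--                 out.append(' ' * run)
--             run = 0
--             prev_op = False
--             out.append(c)
--     if not prev_op:
--         out.append(' ' * run)
--     return ''.join(out)
-- ===== Notes on version B (the rewrite author's own statement) =====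
-- stated objective: simpler
-- what changed: Replaces A's per-operator nested forward/backward index scans over a mutable char list by a single left-to-right pass that buffers each space run and drops it exactly when it is adjacent to a comparison operator.
import Mathlib
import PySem

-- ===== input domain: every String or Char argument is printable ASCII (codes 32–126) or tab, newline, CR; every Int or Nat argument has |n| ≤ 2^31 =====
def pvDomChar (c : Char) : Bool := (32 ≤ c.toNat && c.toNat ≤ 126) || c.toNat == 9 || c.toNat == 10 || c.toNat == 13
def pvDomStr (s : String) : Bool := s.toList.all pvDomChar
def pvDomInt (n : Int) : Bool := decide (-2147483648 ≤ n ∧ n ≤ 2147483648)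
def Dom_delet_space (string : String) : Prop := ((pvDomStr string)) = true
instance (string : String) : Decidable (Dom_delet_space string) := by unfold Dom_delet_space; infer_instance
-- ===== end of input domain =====

-- B replaces A's per-operator nested forward/backward index scans by a single
-- buffered left-to-right pass (simpler, one pass instead of nested scans).

-- ===== PORT A =====
-- cells of A's str_lis: the one-char Python string "c" is [c], the cleared "" is []
def dsIsOp (x : List Char) : Bool := x = ['>'] || x = ['='] || x = ['<']

-- inner forward loop: for j in range(i+1, n): break at non-" ", else clear to ""
def dsFwd (l : List (List Char)) (j : Nat) : List (List Char) :=
  if _h : j < l.length then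
    if l.getD j [] ≠ [' '] then l else dsFwd (l.set j []) (j + 1)
  else l
termination_by l.length - j
decreasing_by simp_all [List.length_set]; omega

theorem dsFwd_len (l : List (List Char)) (j : Nat) : (dsFwd l j).length = l.length := by
  unfold dsFwd
  split
  · split
    · rfl
    · rw [dsFwd_len]; simp
  · rfl
termination_by l.length - j
decreasing_by simp_all [List.length_set]; omega

-- inner backward loop: for k in reversed(range(0, i)): break at non-" ", else clear to ""
def dsBwd (l : List (List Char)) : Nat → List (List Char)
  | 0 => l
  | k + 1 => if l.getD k [] ≠ [' '] then l else dsBwd (l.set k []) k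

theorem dsBwd_len (l : List (List Char)) (k : Nat) : (dsBwd l k).length = l.length := by
  induction k generalizing l with
  | zero => rfl
  | succ k ih =>
    unfold dsBwd
    split
    · rfl
    · rw [ih]; simp

-- outer loop: for i in range(len(str_lis))
def dsPass (l : List (List Char)) (i : Nat) : List (List Char) :=
  if _h : i < l.length then
    dsPass (if dsIsOp (l.getD i []) then dsBwd (dsFwd l (i + 1)) i else l) (i + 1)
  else l
termination_by l.length - i
decreasing_by
  split
  · rw [dsBwd_len, dsFwd_len]; omega
  · omega

def delet_space (string : String) : String :=
  -- str_lis = []; for i in string: str_lis.append(i)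
  let strLis := string.toList.foldl (fun a c => a ++ [[c]]) []
  let res := dsPass strLis 0
  -- string1 = ""; for i in str_lis: string1 += i
  String.mk (res.foldl (fun a x => a ++ x) [])

-- ===== PORT B =====
-- state: (out as chars, run = pending space count, prev_op)
def altStep (st : List Char × Nat × Bool) (c : Char) : List Char × Nat × Bool :=
  if c = ' ' then (st.1, st.2.1 + 1, st.2.2)
  else if c = '<' ∨ c = '>' ∨ c = '=' then (st.1 ++ [c], 0, true)
  else ((if st.2.2 then st.1 else st.1 ++ List.replicate st.2.1 ' ') ++ [c], 0, false)

def delet_space_alt (string : String) : String :=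
  let st := string.toList.foldl altStep ([], 0, false)
  String.mk (if st.2.2 then st.1 else st.1 ++ List.replicate st.2.1 ' ')

-- ===== PRECONDITION & SPEC =====
def Spec_delet_space (string : String) (out : String) : Prop := out = delet_space_alt string
instance (string : String) (out : String) : Decidable (Spec_delet_space string out) := by unfold Spec_delet_space; infer_instance

-- ===== CLAIM (what is proved, stated in full; the proofs are below) =====
def Claim_equal_delet_space : Prop := ∀ (string : String), Dom_delet_space string → Spec_delet_space string (delet_space string)

-- ===== LEMMAS AND PROOFS =====

-- common specification: drop each maximal space run adjacent to an operator
def specRun (l : List Char) : List Char :=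
  if hr : l.dropWhile (· = ' ') = [] then l
  else
    if (l.dropWhile (· = ' ')).head hr = '<' ∨ (l.dropWhile (· = ' ')).head hr = '>' ∨
        (l.dropWhile (· = ' ')).head hr = '=' then
      (l.dropWhile (· = ' ')).head hr ::
        specRun ((l.dropWhile (· = ' ')).tail.dropWhile (· = ' '))
    else
      l.takeWhile (· = ' ') ++ (l.dropWhile (· = ' ')).head hr ::
        specRun ((l.dropWhile (· = ' ')).tail)
termination_by l.length
decreasing_by
  all_goals
    have h1 : (l.dropWhile (· = ' ')).length ≤ l.length := l.length_dropWhile_le _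
    have h2 : (l.dropWhile (· = ' ')).length = (l.dropWhile (· = ' ')).tail.length + 1 := by
      cases hh : l.dropWhile (· = ' ') with
      | nil => exact absurd hh hr
      | cons a b => simp
    have h3 : ((l.dropWhile (· = ' ')).tail.dropWhile (· = ' ')).length ≤
        (l.dropWhile (· = ' ')).tail.length := List.length_dropWhile_le _ _
    omega

theorem tw_compute (sp : List Char) (c : Char) (t : List Char)
    (hsp : ∀ x ∈ sp, x = ' ') (hc : c ≠ ' ') :
    (sp ++ c :: t).takeWhile (· = ' ') = sp ∧ (sp ++ c :: t).dropWhile (· = ' ') = c :: t := by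
  induction sp with
  | nil => simp [List.takeWhile_cons, List.dropWhile_cons, hc]
  | cons x xs ih =>
    have hx : x = ' ' := hsp x (by simp)
    have ih' := ih (fun y hy => hsp y (by simp [hy]))
    subst hx
    simp [List.takeWhile_cons, List.dropWhile_cons, ih'.1, ih'.2]

theorem op_ne_space {c : Char} (h : c = '<' ∨ c = '>' ∨ c = '=') : c ≠ ' ' := by
  rcases h with h | h | h <;> subst h <;> decide

theorem specRun_allspace (l : List Char) (h : ∀ x ∈ l, x = ' ') : specRun l = l := by
  rw [specRun]
  rw [dif_pos (List.dropWhile_eq_nil_iff.mpr (by intro x hx; simp [h x hx]))]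

theorem specRun_op (sp : List Char) (c : Char) (t : List Char)
    (hsp : ∀ x ∈ sp, x = ' ') (hop : c = '<' ∨ c = '>' ∨ c = '=') :
    specRun (sp ++ c :: t) = c :: specRun (t.dropWhile (· = ' ')) := by
  have htw := tw_compute sp c t hsp (op_ne_space hop)
  rw [specRun]
  rw [dif_neg (by rw [htw.2]; simp)]
  simp only [htw.2, List.head_cons, List.tail_cons]
  rw [if_pos hop]

theorem specRun_other (sp : List Char) (c : Char) (t : List Char)
    (hsp : ∀ x ∈ sp, x = ' ') (hc : c ≠ ' ') (hnop : ¬(c = '<' ∨ c = '>' ∨ c = '=')) :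
    specRun (sp ++ c :: t) = sp ++ c :: specRun t := by
  have htw := tw_compute sp c t hsp hc
  rw [specRun]
  rw [dif_neg (by rw [htw.2]; simp)]
  simp only [htw.2, List.head_cons, List.tail_cons]
  rw [if_neg hnop, htw.1]

-- ---- index-shift lemmas for A's loops ----

theorem getD_shift (P B : List (List Char)) (j : Nat) :
    (P ++ B).getD (P.length + j) [] = B.getD j [] := by
  induction P with
  | nil => simp
  | cons p ps ih =>
    have : (p :: ps).length + j = (ps.length + j) + 1 := by simp; omega
    rw [this]
    simpa using ih

theorem getD_left (P B : List (List Char)) (j : Nat) (h : j < P.length) :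
    (P ++ B).getD j [] = P.getD j [] := by
  simp [List.getD, List.getElem?_append_left h]

theorem set_shift (P B : List (List Char)) (j : Nat) (v : List Char) :
    (P ++ B).set (P.length + j) v = P ++ B.set j v := by
  induction P with
  | nil => simp
  | cons p ps ih =>
    have : (p :: ps).length + j = (ps.length + j) + 1 := by simp; omega
    rw [this]
    simpa using ih

theorem dsFwd_shift (P B : List (List Char)) (j : Nat) :
    dsFwd (P ++ B) (P.length + j) = P ++ dsFwd B j := by
  conv_lhs => rw [dsFwd]
  conv_rhs => rw [dsFwd]
  by_cases h : j < B.length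
  · rw [dif_pos (by simp; omega), dif_pos h, getD_shift]
    by_cases h2 : B.getD j [] ≠ [' ']
    · rw [if_pos h2, if_pos h2]
    · rw [if_neg h2, if_neg h2, set_shift]
      have he : P.length + j + 1 = P.length + (j + 1) := by omega
      rw [he]
      exact dsFwd_shift P (B.set j []) (j + 1)
  · rw [dif_neg (by simp; omega), dif_neg h]
termination_by B.length - j
decreasing_by simp [List.length_set]; omega

theorem dsBwd_shift (P B : List (List Char)) (k : Nat) (hP : P.getLast? ≠ some [' ']) :
    dsBwd (P ++ B) (P.length + k) = P ++ dsBwd B k := by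
  induction k generalizing B with
  | zero =>
    show dsBwd (P ++ B) (P.length + 0) = P ++ B
    cases hlen : P.length with
    | zero =>
      have : P = [] := List.eq_nil_of_length_eq_zero hlen
      subst this; rfl
    | succ m =>
      show dsBwd (P ++ B) (m + 1) = P ++ B
      unfold dsBwd
      rw [if_pos]
      have hm : m < P.length := by omega
      rw [getD_left P B m hm]
      have hlast : P.getLast? = some (P.getD m []) := by
        rw [List.getLast?_eq_getElem?]
        simp [List.getD, hlen, List.getElem?_eq_getElem hm]
      intro hcon
      exact hP (by rw [hlast, hcon])
  | succ k ih =>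
    show dsBwd (P ++ B) (P.length + k + 1) = P ++ dsBwd B (k + 1)
    unfold dsBwd
    rw [getD_shift]
    by_cases hc : B.getD k [] ≠ [' ']
    · rw [if_pos hc, if_pos hc]
    · rw [if_neg hc, if_neg hc, set_shift]
      exact ih (B.set k [])

theorem dsPass_shift (P B : List (List Char)) (i : Nat) (hP : P.getLast? ≠ some [' ']) :
    dsPass (P ++ B) (P.length + i) = P ++ dsPass B i := by
  conv_lhs => rw [dsPass]
  conv_rhs => rw [dsPass]
  by_cases h : i < B.length
  · rw [dif_pos (by simp; omega), dif_pos h, getD_shift]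
    by_cases hc : dsIsOp (B.getD i []) = true
    · rw [if_pos hc, if_pos hc]
      have e1 : P.length + i + 1 = P.length + (i + 1) := by omega
      rw [e1, dsFwd_shift, dsBwd_shift P _ i hP]
      exact dsPass_shift P (dsBwd (dsFwd B (i + 1)) i) (i + 1) hP
    · rw [if_neg hc, if_neg hc]
      have e2 : P.length + i + 1 = P.length + (i + 1) := by omega
      rw [e2]
      exact dsPass_shift P B (i + 1) hP
  · rw [dif_neg (by simp; omega), dif_neg h]
termination_by B.length - i
decreasing_by
  all_goals first
    | (rw [dsBwd_len, dsFwd_len]; omega)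
    | omega

theorem dsPass_skip_one (l : List (List Char)) (i : Nat)
    (h : dsIsOp (l.getD i []) = false) : dsPass l i = dsPass l (i + 1) := by
  conv_lhs => rw [dsPass]
  by_cases hi : i < l.length
  · rw [dif_pos hi, if_neg (by simp only [List.getD] at h; simp [h])]
  · rw [dif_neg hi]
    conv_rhs => rw [dsPass]
    rw [dif_neg (by omega)]

theorem dsPass_skip_many (l : List (List Char)) (i m : Nat) (him : i ≤ m)
    (h : ∀ j, i ≤ j → j < m → dsIsOp (l.getD j []) = false) :
    dsPass l i = dsPass l m := by
  by_cases he : i = m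
  · rw [he]
  · rw [dsPass_skip_one l i (h i le_rfl (by omega))]
    exact dsPass_skip_many l (i + 1) m (by omega) (fun j h1 h2 => h j (by omega) h2)
termination_by m - i
decreasing_by omega

theorem dsFwd_clear (m : Nat) (R : List (List Char)) (hR : R.getD 0 [] ≠ [' ']) :
    dsFwd (List.replicate m [' '] ++ R) 0 = List.replicate m ([] : List Char) ++ R := by
  induction m with
  | zero =>
    simp only [List.replicate, List.nil_append]
    rw [dsFwd]
    by_cases hl : 0 < R.length
    · rw [dif_pos hl, if_pos hR]
    · rw [dif_neg hl]
  | succ n ih =>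
    rw [List.replicate_succ, List.cons_append, dsFwd]
    rw [dif_pos (by simp)]
    rw [if_neg (by simp [List.getD])]
    have hset : (([' '] :: (List.replicate n [' '] ++ R)).set 0 []) =
        [([] : List Char)] ++ (List.replicate n [' '] ++ R) := by simp
    rw [hset]
    have := dsFwd_shift [([] : List Char)] (List.replicate n [' '] ++ R) 0
    simp only [List.length_cons, List.length_nil] at this
    rw [this, ih]
    simp [List.replicate_succ]

theorem dsBwd_clear (m : Nat) (R : List (List Char)) :
    dsBwd (List.replicate m [' '] ++ R) m = List.replicate m ([] : List Char) ++ R := by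
  induction m generalizing R with
  | zero => rfl
  | succ n ih =>
    unfold dsBwd
    rw [if_neg (by
      simp only [ne_eq, not_not]
      rw [getD_left _ _ n (by simp), List.getD, List.getElem?_replicate, if_pos (by omega)]
      rfl)]
    have hset : ((List.replicate (n + 1) [' '] ++ R).set n []) =
        List.replicate n [' '] ++ ([([] : List Char)] ++ R) := by
      rw [List.replicate_succ', List.append_assoc]
      have := set_shift (List.replicate n [' ']) ([[' ']] ++ R) 0 []
      simp only [List.length_replicate, Nat.add_zero] at this
      rw [this]
      rfl
    rw [hset, ih]
    rw [List.replicate_succ', List.append_assoc]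

-- ---- cells helpers ----

def cellsOf (l : List Char) : List (List Char) := l.map (fun c => [c])

theorem cellsOf_spaces (sp : List Char) (h : ∀ x ∈ sp, x = ' ') :
    cellsOf sp = List.replicate sp.length [' '] := by
  induction sp with
  | nil => rfl
  | cons x xs ih =>
    have hx : x = ' ' := h x (by simp)
    subst hx
    simp only [cellsOf, List.map_cons, List.length_cons, List.replicate_succ]
    rw [← cellsOf]
    rw [ih (fun y hy => h y (by simp [hy]))]

theorem cellsOf_append (x y : List Char) : cellsOf (x ++ y) = cellsOf x ++ cellsOf y := by
  simp [cellsOf]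

theorem cellsOf_cons (c : Char) (x : List Char) : cellsOf (c :: x) = [c] :: cellsOf x := rfl

theorem flatten_cellsOf (l : List Char) : (cellsOf l).flatten = l := by
  induction l with
  | nil => rfl
  | cons c t ih => simp [cellsOf] at ih ⊢; exact ih

theorem flatten_blanks (m : Nat) : (List.replicate m ([] : List Char)).flatten = [] := by
  induction m with
  | zero => rfl
  | succ n ih => simp [List.replicate_succ, ih]

theorem foldl_append_eq (l : List (List Char)) (a : List Char) :
    l.foldl (fun a x => a ++ x) a = a ++ l.flatten := by
  induction l generalizing a with
  | nil => simp
  | cons x xs ih => simp [List.foldl_cons, ih, List.flatten_cons, List.append_assoc]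

theorem foldl_cells_eq (l : List Char) (a : List (List Char)) :
    l.foldl (fun a c => a ++ [[c]]) a = a ++ cellsOf l := by
  induction l generalizing a with
  | nil => simp [cellsOf]
  | cons c t ih => simp [List.foldl_cons, ih, cellsOf, List.append_assoc]

theorem last_ne_sp (P : List (List Char)) (x : List Char) (hx : x ≠ [' ']) :
    (P ++ [x]).getLast? ≠ some [' '] := by
  rw [List.getLast?_concat]
  simpa using hx

theorem dropWhile_head_false {p : Char → Bool} {l t : List Char} {c : Char}
    (h : l.dropWhile p = c :: t) : p c = false := by
  induction l with
  | nil => simp at h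
  | cons x xs ih =>
    rw [List.dropWhile_cons] at h
    split at h
    · exact ih h
    · next hx => cases h; simpa using hx

-- A's pass computes specRun
theorem pass_spec (l : List Char) : (dsPass (cellsOf l) 0).flatten = specRun l := by
  cases h : l.dropWhile (· = ' ') with
  | nil =>
    have hsp : ∀ x ∈ l, x = ' ' := by
      intro x hx
      have := List.dropWhile_eq_nil_iff.mp h x hx
      simpa using this
    rw [specRun_allspace l hsp]
    rw [cellsOf_spaces l hsp]
    rw [dsPass_skip_many _ 0 l.length (by omega) (by
      intro j h1 h2
      rw [List.getD, List.getElem?_replicate, if_pos h2]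
      rfl)]
    rw [dsPass, dif_neg (by simp)]
    rw [← cellsOf_spaces l hsp, flatten_cellsOf]
  | cons c t =>
    have hdecomp : l = l.takeWhile (· = ' ') ++ c :: t := by
      conv_lhs => rw [← List.takeWhile_append_dropWhile (p := (· = ' ')) (l := l)]
      rw [h]
    have hsp : ∀ x ∈ l.takeWhile (· = ' '), x = ' ' := by
      intro x hx
      have := List.mem_takeWhile_imp hx
      simpa using this
    have hc : ¬ (c = ' ') := by simpa using dropWhile_head_false h
    have hlen : l.length = (l.takeWhile (· = ' ')).length + 1 + t.length := by
      conv_lhs => rw [hdecomp]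
      simp; omega
    by_cases hop : c = '<' ∨ c = '>' ∨ c = '='
    · -- operator case
      have hdect : t = t.takeWhile (· = ' ') ++ t.dropWhile (· = ' ') :=
        (List.takeWhile_append_dropWhile).symm
      have hspt : ∀ x ∈ t.takeWhile (· = ' '), x = ' ' := by
        intro x hx
        have := List.mem_takeWhile_imp hx
        simpa using this
      have hcells : cellsOf l =
          List.replicate (l.takeWhile (· = ' ')).length [' '] ++
            ([c] :: (List.replicate (t.takeWhile (· = ' ')).length [' '] ++
              cellsOf (t.dropWhile (· = ' ')))) := by
        conv_lhs => rw [hdecomp, hdect]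
        rw [cellsOf_append, cellsOf_cons, cellsOf_append,
          cellsOf_spaces _ hsp, cellsOf_spaces _ hspt]
      set a := (l.takeWhile (· = ' ')).length with ha
      set b := (t.takeWhile (· = ' ')).length with hb
      set t2 := t.dropWhile (· = ' ') with ht2
      -- skip the leading spaces
      rw [hcells]
      rw [dsPass_skip_many _ 0 a (by omega) (by
        intro j h1 h2
        rw [List.getD, List.getElem?_append_left (by simpa using h2), List.getElem?_replicate,
          if_pos h2]
        rfl)]
      -- process the operator at index a
      rw [dsPass, dif_pos (by simp)]
      rw [show (List.replicate a ([' '] : List Char) ++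
            ([c] :: (List.replicate b [' '] ++ cellsOf t2))).getD a [] =
          [c] by
        have := getD_shift (List.replicate a [' ']) ([c] :: (List.replicate b [' '] ++ cellsOf t2)) 0
        simp only [List.length_replicate, Nat.add_zero] at this
        rw [this]; rfl]
      rw [if_pos (by rcases hop with h' | h' | h' <;> subst h' <;> rfl)]
      -- forward scan clears the run after the operator
      have hfwd : dsFwd (List.replicate a ([' '] : List Char) ++
            ([c] :: (List.replicate b [' '] ++ cellsOf t2))) (a + 1) =
          (List.replicate a ([' '] : List Char) ++ [[c]]) ++
            (List.replicate b ([] : List Char) ++ cellsOf t2) := by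
        have hsplit : List.replicate a ([' '] : List Char) ++
              ([c] :: (List.replicate b [' '] ++ cellsOf t2)) =
            (List.replicate a ([' '] : List Char) ++ [[c]]) ++
              (List.replicate b [' '] ++ cellsOf t2) := by
          simp [List.append_assoc]
        rw [hsplit]
        have hlenP : (List.replicate a ([' '] : List Char) ++ [[c]]).length = a + 1 := by simp
        have := dsFwd_shift (List.replicate a [' '] ++ [[c]])
          (List.replicate b [' '] ++ cellsOf t2) 0
        rw [hlenP] at this
        rw [this]
        congr 1
        apply dsFwd_clear
        cases h2 : t2 with
        | nil => simp [cellsOf, List.getD]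
        | cons d t2' =>
          have hd : ¬ (d = ' ') := by simpa using dropWhile_head_false (ht2 ▸ h2 : t.dropWhile (· = ' ') = d :: t2')
          simp [cellsOf, h2, List.getD]
          intro hcon
          exact hd hcon
      rw [hfwd]
      -- backward scan clears the run before the operator
      have hbwd : dsBwd ((List.replicate a ([' '] : List Char) ++ [[c]]) ++
            (List.replicate b ([] : List Char) ++ cellsOf t2)) a =
          List.replicate a ([] : List Char) ++
            ([[c]] ++ (List.replicate b ([] : List Char) ++ cellsOf t2)) := by
        rw [List.append_assoc]
        exact dsBwd_clear a _
      rw [hbwd]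
      -- skip the cleared cells, split off the inert prefix
      set Q := List.replicate a ([] : List Char) ++
          ([[c]] ++ List.replicate b ([] : List Char)) with hQ
      have hre : List.replicate a ([] : List Char) ++
            ([[c]] ++ (List.replicate b ([] : List Char) ++ cellsOf t2)) =
          Q ++ cellsOf t2 := by
        rw [hQ]; simp [List.append_assoc]
      rw [hre]
      have hQlen : Q.length = a + 1 + b := by
        rw [hQ]
        simp only [List.length_append, List.length_replicate, List.length_cons,
          List.length_nil]
        omega
      rw [dsPass_skip_many (Q ++ cellsOf t2) (a + 1) (a + 1 + b) (by omega) (by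
        intro j h1 h2
        rw [getD_left _ _ j (by omega)]
        rw [hQ]
        have : (List.replicate a ([] : List Char) ++
            ([[c]] ++ List.replicate b ([] : List Char))).getD j [] = [] := by
          rw [List.getD]
          rw [List.getElem?_append_right (by simp only [List.length_replicate]; omega)]
          simp only [List.length_replicate]
          rw [List.getElem?_append_right (by simp only [List.length_cons, List.length_nil]; omega)]
          simp only [List.length_cons, List.length_nil]
          rw [List.getElem?_replicate, if_pos (by omega)]
          rfl
        rw [this]
        rfl)]
      have hQlast : Q.getLast? ≠ some [' '] := by
        rw [hQ]
        by_cases hb0 : b = 0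
        · rw [hb0]
          rw [show List.replicate a ([] : List Char) ++ ([[c]] ++ List.replicate 0 []) =
              List.replicate a ([] : List Char) ++ [[c]] by simp]
          exact last_ne_sp _ _ (by simpa using hc)
        · obtain ⟨n, hn⟩ : ∃ n, b = n + 1 := ⟨b - 1, by omega⟩
          rw [hn, List.replicate_succ']
          rw [show List.replicate a ([] : List Char) ++
              ([[c]] ++ (List.replicate n ([] : List Char) ++ [[]])) =
              (List.replicate a ([] : List Char) ++ ([[c]] ++ List.replicate n [])) ++ [[]] by
            simp [List.append_assoc]]
          exact last_ne_sp _ _ (by simp)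
      have := dsPass_shift Q (cellsOf t2) 0 hQlast
      rw [Nat.add_zero, hQlen] at this
      rw [this]
      rw [List.flatten_append]
      rw [show Q.flatten = [c] by
        rw [hQ]
        simp [List.flatten_append, flatten_blanks]]
      have hrec : (dsPass (cellsOf t2) 0).flatten = specRun t2 := pass_spec t2
      rw [hrec]
      conv_rhs => rw [hdecomp]
      rw [specRun_op _ _ _ hsp hop]
      rfl
    · -- ordinary character case
      have hcells : cellsOf l =
          (List.replicate (l.takeWhile (· = ' ')).length [' '] ++ [[c]]) ++ cellsOf t := by
        conv_lhs => rw [hdecomp]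
        rw [cellsOf_append, cellsOf_cons, cellsOf_spaces _ hsp]
        simp [List.append_assoc]
      set a := (l.takeWhile (· = ' ')).length with ha
      rw [hcells]
      rw [dsPass_skip_many _ 0 (a + 1) (by omega) (by
        intro j h1 h2
        rw [getD_left _ _ j (by simp; omega)]
        by_cases hj : j < a
        · rw [getD_left _ _ j (by simpa using hj), List.getD, List.getElem?_replicate, if_pos hj]
          rfl
        · have hj' : j = a := by omega
          subst hj'
          have := getD_shift (List.replicate a ([' '] : List Char)) [[c]] 0
          simp only [List.length_replicate, Nat.add_zero] at this
          rw [this]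
          show dsIsOp [c] = false
          simp only [dsIsOp]
          rcases Decidable.em (c = '>') with h' | h'
          · exact absurd (Or.inr (Or.inl h')) hop
          rcases Decidable.em (c = '=') with h'' | h''
          · exact absurd (Or.inr (Or.inr h'')) hop
          rcases Decidable.em (c = '<') with h''' | h'''
          · exact absurd (Or.inl h''') hop
          simp [h', h'', h'''])]
      have hPlast : (List.replicate a ([' '] : List Char) ++ [[c]]).getLast? ≠ some [' '] := by
        exact last_ne_sp _ _ (by simpa using hc)
      have hPlen : (List.replicate a ([' '] : List Char) ++ [[c]]).length = a + 1 := by simp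
      have := dsPass_shift (List.replicate a [' '] ++ [[c]]) (cellsOf t) 0 hPlast
      rw [Nat.add_zero, hPlen] at this
      rw [this]
      rw [List.flatten_append]
      rw [show (List.replicate a ([' '] : List Char) ++ [[c]]).flatten =
          l.takeWhile (· = ' ') ++ [c] by
        rw [← cellsOf_spaces _ hsp, List.flatten_append, flatten_cellsOf]
        simp]
      have hrec : (dsPass (cellsOf t) 0).flatten = specRun t := pass_spec t
      rw [hrec]
      conv_rhs => rw [hdecomp]
      rw [specRun_other _ _ _ hsp hc hop]
      simp [List.append_assoc]
termination_by l.length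
decreasing_by
  all_goals
    have h3 : (t.dropWhile (· = ' ')).length ≤ t.length := t.length_dropWhile_le _
    omega

-- B's fold computes specRun
def hRun : Nat → Bool → List Char → List Char
  | run, p, [] => if p then [] else List.replicate run ' '
  | run, p, c :: t =>
    if c = ' ' then hRun (run + 1) p t
    else if c = '<' ∨ c = '>' ∨ c = '=' then c :: hRun 0 true t
    else (if p then [] else List.replicate run ' ') ++ c :: hRun 0 false t

theorem fold_hRun (l : List Char) (out : List Char) (run : Nat) (p : Bool) :
    (fun st : List Char × Nat × Bool =>
        if st.2.2 then st.1 else st.1 ++ List.replicate st.2.1 ' ')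
      (l.foldl altStep (out, run, p)) = out ++ hRun run p l := by
  induction l generalizing out run p with
  | nil =>
    simp only [List.foldl_nil, hRun]
    split <;> simp
  | cons c t ih =>
    rw [List.foldl_cons]
    by_cases h1 : c = ' '
    · have hs : altStep (out, run, p) c = (out, run + 1, p) := by
        simp only [altStep, if_pos h1]
      rw [hs, ih]
      simp only [hRun]
      rw [if_pos h1]
    · by_cases h2 : c = '<' ∨ c = '>' ∨ c = '='
      · have hs : altStep (out, run, p) c = (out ++ [c], 0, true) := by
          simp only [altStep, if_neg h1, if_pos h2]
        rw [hs, ih]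
        simp only [hRun]
        rw [if_neg h1, if_pos h2]
        simp [List.append_assoc]
      · have hs : altStep (out, run, p) c =
            ((if p then out else out ++ List.replicate run ' ') ++ [c], 0, false) := by
          simp only [altStep, if_neg h1, if_neg h2]
        rw [hs, ih]
        simp only [hRun]
        rw [if_neg h1, if_neg h2]
        cases p <;> simp [List.append_assoc]

theorem allspace_replicate (run : Nat) : ∀ x ∈ List.replicate run ' ', x = ' ' := by
  intro x hx
  exact List.eq_of_mem_replicate hx

theorem hRun_spec (l : List Char) : ∀ run : Nat,
    hRun run true l = specRun (l.dropWhile (· = ' ')) ∧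
    hRun run false l = specRun (List.replicate run ' ' ++ l) := by
  induction l with
  | nil =>
    intro run
    refine ⟨?_, ?_⟩
    · rw [List.dropWhile_nil, specRun_allspace [] (by simp)]
      simp [hRun]
    · rw [List.append_nil, specRun_allspace _ (allspace_replicate run)]
      simp [hRun]
  | cons c t ih =>
    intro run
    by_cases h1 : c = ' '
    · have hdw : List.dropWhile (· = ' ') (c :: t) = List.dropWhile (· = ' ') t := by
        rw [List.dropWhile_cons, if_pos (by simp [h1])]
      refine ⟨?_, ?_⟩
      · simp only [hRun]
        rw [if_pos h1, hdw]
        exact (ih (run + 1)).1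
      · simp only [hRun]
        rw [if_pos h1, (ih (run + 1)).2, h1,
          show List.replicate (run + 1) ' ' ++ t = List.replicate run ' ' ++ ' ' :: t by
            rw [List.replicate_succ', List.append_assoc]; rfl]
    · have hdw : List.dropWhile (· = ' ') (c :: t) = c :: t := by
        simpa using (tw_compute [] c t (by simp) h1).2
      by_cases h2 : c = '<' ∨ c = '>' ∨ c = '='
      · have hso : specRun (c :: t) = c :: specRun (List.dropWhile (· = ' ') t) := by
          simpa using specRun_op [] c t (by simp) h2
        refine ⟨?_, ?_⟩
        · simp only [hRun]
          rw [if_neg h1, if_pos h2, (ih 0).1, hdw, hso]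
        · rw [specRun_op _ c t (allspace_replicate run) h2]
          simp only [hRun]
          rw [if_neg h1, if_pos h2, (ih 0).1]
      · have hso : specRun (c :: t) = c :: specRun t := by
          simpa using specRun_other [] c t (by simp) h1 h2
        refine ⟨?_, ?_⟩
        · simp only [hRun]
          rw [if_neg h1, if_neg h2, (ih 0).2, hdw, hso]
          simp
        · rw [specRun_other _ c t (allspace_replicate run) h1 h2]
          simp only [hRun]
          rw [if_neg h1, if_neg h2, (ih 0).2]
          simp

theorem delet_space_eq_alt (s : String) : delet_space s = delet_space_alt s := by
  show String.mk ((dsPass (s.toList.foldl (fun a c => a ++ [[c]]) []) 0).foldl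
      (fun a x => a ++ x) []) =
    String.mk (if (s.toList.foldl altStep ([], 0, false)).2.2 then
        (s.toList.foldl altStep ([], 0, false)).1
      else (s.toList.foldl altStep ([], 0, false)).1 ++
        List.replicate (s.toList.foldl altStep ([], 0, false)).2.1 ' ')
  congr 1
  rw [foldl_cells_eq, List.nil_append, foldl_append_eq, List.nil_append, pass_spec]
  have hB := fold_hRun s.toList [] 0 false
  simp only [List.nil_append] at hB
  rw [hB]
  rw [(hRun_spec s.toList 0).2]
  rfl

-- ===== VERDICT (by name: the statement is the Claim_ definition above) =====
theorem delet_space_spec : Claim_equal_delet_space := by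
  intro s _
  unfold Spec_delet_space
  exact delet_space_eq_alt s
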